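-- pv_equiv track=rewrite | github.com/greenblat/vlsistuff | pybin3/macro_verilog_pp.py | remove_synopsys_on_off
-- ===== SOURCE A (Python) =====
-- def remove_synopsys_on_off(Lines):
--     Linesx = []
--     state='on'
--     for line in Lines:
--         wrds = line.split()
--         if 'synopsys' in wrds:
--             ind = wrds.index('synopsys')
--             if (state=='on'):
--                 if (len(wrds)>ind)and(wrds[ind+1]=='translate_off'):
--                     state='off'
--                 else:
--                     Linesx.append(line)
--
--             elif (state=='off'):
--                 ind = wrds.index('synopsys')
--                 if (len(wrds)>ind)and(wrds[ind+1]=='translate_on'):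
--                     state='on'
--         elif (state=='on'):
--             Linesx.append(line)
--     return Linesx
-- ===== SOURCE B (Python) =====
-- def remove_synopsys_on_off(Lines):
--     Linesx = []
--     it = iter(Lines)
--     for line in it:
--         wrds = line.split()
--         if 'synopsys' in wrds and wrds[wrds.index('synopsys') + 1] == 'translate_off':
--             # skip the whole off-block on the same iterator
--             for l2 in it:
--                 w2 = l2.split()
--                 if 'synopsys' in w2 and w2[w2.index('synopsys') + 1] == 'translate_on':
--                     break
--         else:
--             Linesx.append(line)
--     return Linesx
-- ===== Notes on version B (the rewrite author's own statement) =====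
-- stated objective: alternative
-- what changed: Replaces the explicit on/off state variable threaded through one flat loop by nested block-skipping over a single shared iterator: an inner loop consumes and drops the translate_off..translate_on block, so no state flag exists.
import Mathlib
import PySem

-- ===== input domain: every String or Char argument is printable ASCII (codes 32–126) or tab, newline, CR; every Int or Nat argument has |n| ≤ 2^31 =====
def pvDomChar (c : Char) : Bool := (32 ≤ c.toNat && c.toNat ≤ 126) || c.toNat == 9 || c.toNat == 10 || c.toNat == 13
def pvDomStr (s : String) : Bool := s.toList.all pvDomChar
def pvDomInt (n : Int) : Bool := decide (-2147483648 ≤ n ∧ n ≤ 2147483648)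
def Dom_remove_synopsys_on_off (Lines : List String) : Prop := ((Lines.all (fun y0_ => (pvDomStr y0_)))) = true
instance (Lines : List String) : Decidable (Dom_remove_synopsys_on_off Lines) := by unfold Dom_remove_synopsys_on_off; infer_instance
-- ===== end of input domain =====

-- B replaces A's explicit on/off state machine by nested block-skipping over one shared
-- iterator (alternative decomposition, same cost).

-- ===== PORT A =====
-- one step of A's for-loop: state is (Linesx, state-flag string)
def pvStepA (st : List String × String) (line : String) : List String × String :=
  let wrds := PySem.Str.split₀ line
  match PySem.List.index? wrds "synopsys" with
  | some ind =>
    if st.2 == "on" then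
      if decide (wrds.length > ind) && (PySem.List.pyGet? wrds ((ind : Int) + 1) == some "translate_off") then
        (st.1, "off")
      else
        (st.1 ++ [line], st.2)
    else if st.2 == "off" then
      if decide (wrds.length > ind) && (PySem.List.pyGet? wrds ((ind : Int) + 1) == some "translate_on") then
        (st.1, "on")
      else st
    else st
  | none =>
    if st.2 == "on" then (st.1 ++ [line], st.2) else st

def remove_synopsys_on_off (Lines : List String) : List String :=
  (Lines.foldl pvStepA ([], "on")).1

-- ===== PORT B =====
-- the outer loop 'for line in it' (copy mode)
mutual
def pvAltOn : List String → List String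
  | [] => []
  | line :: rest =>
    let wrds := PySem.Str.split₀ line
    match PySem.List.index? wrds "synopsys" with
    | some ind =>
      if PySem.List.pyGet? wrds ((ind : Int) + 1) == some "translate_off" then
        pvAltSkip rest
      else
        line :: pvAltOn rest
    | none => line :: pvAltOn rest

-- the inner loop 'for l2 in it' (skip mode, breaks on translate_on)
def pvAltSkip : List String → List String
  | [] => []
  | l2 :: rest =>
    let w2 := PySem.Str.split₀ l2
    match PySem.List.index? w2 "synopsys" with
    | some ind =>
      if PySem.List.pyGet? w2 ((ind : Int) + 1) == some "translate_on" then
        pvAltOn rest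
      else
        pvAltSkip rest
    | none => pvAltSkip rest
end

def remove_synopsys_on_off_alt (Lines : List String) : List String :=
  pvAltOn Lines

-- ===== PRECONDITION & SPEC =====
-- Pre_ excludes exactly the inputs on which A raises IndexError: a line whose first
-- 'synopsys' word is its last word (wrds[ind+1] is out of range). B raises there too.
def Pre_remove_synopsys_on_off (Lines : List String) : Prop :=
  (Lines.all (fun line =>
    let wrds := PySem.Str.split₀ line
    match PySem.List.index? wrds "synopsys" with
    | some ind => decide (ind + 1 < wrds.length)
    | none => true)) = true
instance (Lines : List String) : Decidable (Pre_remove_synopsys_on_off Lines) := by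
  unfold Pre_remove_synopsys_on_off; infer_instance

def pvWitness_remove_synopsys_on_off : List String :=
  ["keep me", "// synopsys translate_off", "drop me", "// synopsys translate_on", "kept"]

def Spec_remove_synopsys_on_off (Lines : List String) (out : List String) : Prop := out = remove_synopsys_on_off_alt Lines
instance (Lines : List String) (out : List String) : Decidable (Spec_remove_synopsys_on_off Lines out) := by unfold Spec_remove_synopsys_on_off; infer_instance

-- ===== CLAIM (what is proved, stated in full; the proofs are below) =====
def Claim_equal_remove_synopsys_on_off : Prop := ∀ (Lines : List String), Dom_remove_synopsys_on_off Lines → Pre_remove_synopsys_on_off Lines → Spec_remove_synopsys_on_off Lines (remove_synopsys_on_off Lines)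

-- ===== LEMMAS AND PROOFS =====

-- index? returns an in-range index
theorem pv_index_lt {xs : List String} {v : String} {k : ℕ}
    (h : PySem.List.index? xs v = some k) : k < xs.length := by
  obtain ⟨hk, -, -⟩ := PySem.List.getElem_of_index?_eq_some h
  exact hk

-- main invariant: A's fold from either state equals the corresponding B mode,
-- with the accumulator prefixed
theorem pv_fold_eq (rest : List String) : ∀ acc : List String,
    (rest.foldl pvStepA (acc, "on")).1 = acc ++ pvAltOn rest ∧
    (rest.foldl pvStepA (acc, "off")).1 = acc ++ pvAltSkip rest := by
  induction rest with
  | nil => intro acc; simp [pvAltOn, pvAltSkip]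
  | cons line rest ih =>
    intro acc
    cases hidx : List.idxOf? "synopsys" (PySem.Str.split₀ line) with
    | none =>
      have hA : pvAltOn (line :: rest) = line :: pvAltOn rest := by
        simp [pvAltOn, hidx]
      have hS : pvAltSkip (line :: rest) = pvAltSkip rest := by
        simp [pvAltSkip, hidx]
      have s1 : pvStepA (acc, "on") line = (acc ++ [line], "on") := by
        simp [pvStepA, hidx]
      have s2 : pvStepA (acc, "off") line = (acc, "off") := by
        simp [pvStepA, hidx]
      refine ⟨?_, ?_⟩
      · rw [List.foldl_cons, s1, hA, (ih (acc ++ [line])).1]; simp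
      · rw [List.foldl_cons, s2, hS]; exact (ih acc).2
    | some ind =>
      have hlt : ind < (PySem.Str.split₀ line).length :=
        pv_index_lt (by simpa using hidx)
      refine ⟨?_, ?_⟩
      · by_cases hoff : PySem.List.pyGet? (PySem.Str.split₀ line) ((ind : Int) + 1) = some "translate_off"
        · have s1 : pvStepA (acc, "on") line = (acc, "off") := by
            simp [pvStepA, hidx, hlt, hoff]
          have hA : pvAltOn (line :: rest) = pvAltSkip rest := by
            simp [pvAltOn, hidx, hoff]
          rw [List.foldl_cons, s1, hA]; exact (ih acc).2
        · have s1 : pvStepA (acc, "on") line = (acc ++ [line], "on") := by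
            simp [pvStepA, hidx, hlt, hoff]
          have hA : pvAltOn (line :: rest) = line :: pvAltOn rest := by
            simp [pvAltOn, hidx, hoff]
          rw [List.foldl_cons, s1, hA, (ih (acc ++ [line])).1]; simp
      · by_cases hon : PySem.List.pyGet? (PySem.Str.split₀ line) ((ind : Int) + 1) = some "translate_on"
        · have s2 : pvStepA (acc, "off") line = (acc, "on") := by
            simp [pvStepA, hidx, hlt, hon]
          have hS : pvAltSkip (line :: rest) = pvAltOn rest := by
            simp [pvAltSkip, hidx, hon]
          rw [List.foldl_cons, s2, hS]; exact (ih acc).1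
        · have s2 : pvStepA (acc, "off") line = (acc, "off") := by
            simp [pvStepA, hidx, hlt, hon]
          have hS : pvAltSkip (line :: rest) = pvAltSkip rest := by
            simp [pvAltSkip, hidx, hon]
          rw [List.foldl_cons, s2, hS]; exact (ih acc).2

-- ===== VERDICT (by name: the statement is the Claim_ definition above) =====
theorem remove_synopsys_on_off_spec : Claim_equal_remove_synopsys_on_off := by
  intro Lines _ _
  show remove_synopsys_on_off Lines = remove_synopsys_on_off_alt Lines
  unfold remove_synopsys_on_off remove_synopsys_on_off_alt
  simpa using (pv_fold_eq Lines []).1
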